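-- pv_equiv track=rewrite | github.com/mattHawthorn/advent_of_code_2023 | src/solutions/day12.py | active_placements
-- ===== SOURCE A (Python) =====
-- from collections import deque
-- from itertools import chain
-- from typing import IO, Iterable, Iterator, Literal, NamedTuple, Sequence, cast
--
-- State = Literal["?", "#", "."]
--
-- ACTIVE: State = "#"
--
-- INACTIVE: State = "."
--
-- def active_placements(states: Sequence[State], n_active: int) -> Iterator[int]:
--     start = next((i for i, s in enumerate(states) if s != INACTIVE), None)
--     if start is not None:
--         prefix = states[start : start + n_active]  # noqa: E203
--         if len(prefix) == n_active:
--             window = deque(chain((INACTIVE,), prefix))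
--             for i, after in enumerate(
--                 chain(states[start + n_active :], (INACTIVE,)), start  # noqa: E203
--             ):
--                 before = window.popleft()
--                 if before == ACTIVE:
--                     break
--                 if after != ACTIVE and all(map(INACTIVE.__ne__, window)):
--                     yield i
--                 window.append(after)
-- ===== SOURCE B (Python) =====
-- def active_placements(states, n_active):
--     # One pass with a running count of '.' cells in the sliding window (no rescans).
--     n = len(states)
--     start = next((i for i, s in enumerate(states) if s != "."), None)
--     if start is None or n_active < 0 or start + n_active > n:
--         return
--     dots = sum(1 for s in states[start:start + n_active] if s == ".")
--     for i in range(start, n - n_active + 1):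
--         if i > start and states[i - 1] == "#":
--             break
--         if dots == 0 and (i + n_active == n or states[i + n_active] != "#"):
--             yield i
--         if i < n - n_active:
--             dots += (states[i + n_active] == ".") - (states[i] == ".")
-- ===== Notes on version B (the rewrite author's own statement) =====
-- stated objective: faster
-- what changed: Replaces A's deque window that is rescanned with all() at every position by a single pass over indices keeping a running count of '.' cells in the sliding window, updated in O(1) per step.
import Mathlib
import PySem

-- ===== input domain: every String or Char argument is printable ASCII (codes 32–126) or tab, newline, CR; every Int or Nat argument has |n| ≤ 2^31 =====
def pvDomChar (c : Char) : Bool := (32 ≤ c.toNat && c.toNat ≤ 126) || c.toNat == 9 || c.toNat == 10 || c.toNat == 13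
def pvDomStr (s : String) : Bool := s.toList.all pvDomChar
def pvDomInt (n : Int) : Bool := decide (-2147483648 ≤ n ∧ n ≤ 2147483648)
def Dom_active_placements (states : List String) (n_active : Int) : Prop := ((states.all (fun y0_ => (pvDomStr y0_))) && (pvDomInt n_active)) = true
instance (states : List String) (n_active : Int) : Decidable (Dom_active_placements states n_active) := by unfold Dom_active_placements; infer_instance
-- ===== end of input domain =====

-- B replaces A's per-position rescan of the deque window by a running count of "." cells
-- in the sliding window (objective: faster, asymptotic O(n·k) → O(n)); return value only
-- (both Pythons are generators; equivalence is about the yielded sequence).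

-- ===== PORT A =====
-- next((i for i, s in enumerate(states) if s != INACTIVE), None), used by both sources
def pvFindStart : Int → List String → Option Int
  | _, [] => none
  | i, s :: rest => if s ≠ "." then some i else pvFindStart (i + 1) rest

-- the for-loop of A: rest = remaining `chain(states[start+n:], ('.',))`, window = the deque
def pvLoopA : List String → List String → Int → List Int → List Int
  | [], _, _, acc => acc.reverse
  | _ :: _, [], _, acc => acc.reverse   -- unreachable (the deque is never empty at popleft)
  | after :: rs, before :: w, i, acc =>
    if before = "#" then acc.reverse
    else pvLoopA rs (w ++ [after]) (i + 1)
      (if after ≠ "#" ∧ ∀ x ∈ w, x ≠ "." then i :: acc else acc)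

def active_placements (states : List String) (n_active : Int) : List Int :=
  match pvFindStart 0 states with
  | none => []
  | some start =>
    let pfx := PySem.List.slice states (some start) (some (start + n_active))
    if (pfx.length : Int) = n_active then
      pvLoopA (PySem.List.slice states (some (start + n_active)) none ++ ["."])
        ("." :: pfx) start []
    else []

-- ===== PORT B =====
-- the for-loop of Source B: fuel = number of remaining indices of range(start, n - n_active + 1)
def pvLoopB (S : List String) (n n_active start : Int) :
    Nat → Int → Int → List Int → List Int
  | 0, _, _, acc => acc.reverse
  | fuel + 1, i, dots, acc =>
    if start < i ∧ PySem.List.pyGetD S (i - 1) "" = "#" then acc.reverse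
    else
      let acc' := if dots = 0 ∧ (i + n_active = n ∨ PySem.List.pyGetD S (i + n_active) "" ≠ "#")
        then i :: acc else acc
      let dots' := if i < n - n_active then
          dots + (if PySem.List.pyGetD S (i + n_active) "" = "." then 1 else 0)
               - (if PySem.List.pyGetD S i "" = "." then 1 else 0)
        else dots
      pvLoopB S n n_active start fuel (i + 1) dots' acc'

def active_placements_alt (states : List String) (n_active : Int) : List Int :=
  let n : Int := states.length
  match pvFindStart 0 states with
  | none => []
  | some start =>
    if n_active < 0 ∨ start + n_active > n then []
    else
      pvLoopB states n n_active start (n - n_active + 1 - start).toNat start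
        (((PySem.List.slice states (some start) (some (start + n_active))).countP
            (fun x => x == ".") : Int)) []

-- ===== PRECONDITION & SPEC =====
def Spec_active_placements (states : List String) (n_active : Int) (out : List Int) : Prop := out = active_placements_alt states n_active
instance (states : List String) (n_active : Int) (out : List Int) : Decidable (Spec_active_placements states n_active out) := by unfold Spec_active_placements; infer_instance

-- ===== CLAIM (what is proved, stated in full; the proofs are below) =====
def Claim_equal_active_placements : Prop := ∀ (states : List String) (n_active : Int), Dom_active_placements states n_active → Spec_active_placements states n_active (active_placements states n_active)

-- ===== LEMMAS AND PROOFS =====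

lemma pvLoopA_nil (w : List String) (i : Int) (acc : List Int) :
    pvLoopA [] w i acc = acc.reverse := rfl

lemma pvLoopA_cons (after : String) (rs : List String) (before : String) (w : List String)
    (i : Int) (acc : List Int) :
    pvLoopA (after :: rs) (before :: w) i acc =
      if before = "#" then acc.reverse
      else pvLoopA rs (w ++ [after]) (i + 1)
        (if after ≠ "#" ∧ ∀ x ∈ w, x ≠ "." then i :: acc else acc) := rfl

lemma pvLoopB_zero (S : List String) (n n_active start i dots : Int) (acc : List Int) :
    pvLoopB S n n_active start 0 i dots acc = acc.reverse := rfl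

lemma pvLoopB_succ (S : List String) (n n_active start : Int) (fuel : Nat) (i dots : Int)
    (acc : List Int) :
    pvLoopB S n n_active start (fuel + 1) i dots acc =
      if start < i ∧ PySem.List.pyGetD S (i - 1) "" = "#" then acc.reverse
      else pvLoopB S n n_active start fuel (i + 1)
        (if i < n - n_active then
          dots + (if PySem.List.pyGetD S (i + n_active) "" = "." then 1 else 0)
               - (if PySem.List.pyGetD S i "" = "." then 1 else 0)
         else dots)
        (if dots = 0 ∧ (i + n_active = n ∨ PySem.List.pyGetD S (i + n_active) "" ≠ "#")
         then i :: acc else acc) := rfl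

lemma pvFindStart_spec (S : List String) : ∀ (j : Nat) (st : Int),
    pvFindStart (↑j) S = some st → ∃ t : Nat, st = ↑t ∧ j ≤ t ∧ t < j + S.length := by
  induction S with
  | nil => intro j st h; simp [pvFindStart] at h
  | cons x xs ih =>
    intro j st h
    simp only [pvFindStart] at h
    split_ifs at h with hx
    · refine ⟨j, (Option.some.inj h).symm, le_refl j, ?_⟩
      simp only [List.length_cons]; omega
    · have hcast : ((j : Int) + 1) = ((j + 1 : Nat) : Int) := by push_cast; ring
      rw [hcast] at h
      obtain ⟨t, ht, hjt, hlt⟩ := ih (j + 1) st h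
      refine ⟨t, ht, by omega, ?_⟩
      simp only [List.length_cons]; omega

lemma window_shift (S : List String) (i k : Nat) (h : i + k < S.length) :
    (S.drop i).take k ++ [S[i + k]'h] = S.getD i "" :: (S.drop (i + 1)).take k := by
  have h1 : i < S.length := by omega
  rw [List.getD_eq_getElem S "" h1, List.drop_eq_getElem_cons h1]
  cases k with
  | zero => simp
  | succ k' =>
    rw [List.take_succ_cons, List.cons_append]
    congr 1
    have hq : (S.drop (i + 1))[k']? = S[i + 1 + k']? := List.getElem?_drop
    rw [List.take_add_one, hq, show i + 1 + k' = i + (k' + 1) from by omega,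
        List.getElem?_eq_getElem h]
    rfl

lemma break_iff (S : List String) (s i : Nat) (b : String) (hsi : s ≤ i)
    (hb : b = if i = s then "." else S.getD (i - 1) "") :
    (b = "#") ↔ ((↑s : Int) < ↑i ∧ PySem.List.pyGetD S (↑i - 1) "" = "#") := by
  by_cases hi : i = s
  · rw [hb, if_pos hi, hi]
    have h1 : ¬("." : String) = "#" := by decide
    have h2 : ¬((s : Int) < (s : Int)) := lt_irrefl _
    simp [h1]
  · have hi' : s < i := lt_of_le_of_ne hsi (Ne.symm hi)
    have h1 : ((i : Int) - 1) = ((i - 1 : Nat) : Int) := by omega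
    rw [hb, if_neg hi, h1, PySem.List.pyGetD_natCast]
    rw [and_iff_right (by exact_mod_cast hi')]

lemma count_iff (w : List String) :
    (∀ x ∈ w, x ≠ ".") ↔ ((w.countP (fun x => x == ".") : Int) = 0) := by
  rw [Int.natCast_eq_zero, List.countP_eq_zero]
  simp

lemma loop_eq (S : List String) (k s : Nat) :
    ∀ (m : Nat), ∀ (i : Nat), s ≤ i → i + k + m = S.length →
    ∀ (b : String), (b = if i = s then "." else S.getD (i - 1) "") →
    ∀ (acc : List Int),
    pvLoopA (S.drop (i + k) ++ ["."]) (b :: (S.drop i).take k) (↑i) acc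
      = pvLoopB S ↑S.length ↑k ↑s (m + 1) ↑i
          (((S.drop i).take k).countP (fun x => x == ".") : Int) acc := by
  intro m
  induction m with
  | zero =>
    intro i hsi hlen b hb acc
    have hdrop : S.drop (i + k) = [] := List.drop_eq_nil_of_le (by omega)
    rw [hdrop, List.nil_append, pvLoopA_cons, pvLoopB_succ]
    rw [if_congr (break_iff S s i b hsi hb) rfl rfl]
    by_cases hbr : (↑s : Int) < ↑i ∧ PySem.List.pyGetD S (↑i - 1) "" = "#"
    · rw [if_pos hbr, if_pos hbr]
    · rw [if_neg hbr, if_neg hbr, pvLoopA_nil, pvLoopB_zero]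
      congr 1
      have hyield : ((("." : String) ≠ "#") ∧ ∀ x ∈ (S.drop i).take k, x ≠ ".")
          ↔ (((((S.drop i).take k).countP (fun x => x == ".")) : Int) = 0
             ∧ ((↑i + ↑k : Int) = ↑S.length ∨ PySem.List.pyGetD S ((↑i : Int) + ↑k) "" ≠ "#")) := by
        rw [and_iff_right (by decide : ("." : String) ≠ "#"), count_iff]
        constructor
        · intro h0
          refine ⟨h0, Or.inl ?_⟩
          have : i + k = S.length := by omega
          exact_mod_cast congrArg (Nat.cast : Nat → Int) this
        · intro h0; exact h0.1
      rw [if_congr hyield rfl rfl]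
  | succ m ih =>
    intro i hsi hlen b hb acc
    have hik : i + k < S.length := by omega
    have hi : i < S.length := by omega
    rw [List.drop_eq_getElem_cons hik, List.cons_append, pvLoopA_cons, pvLoopB_succ]
    rw [if_congr (break_iff S s i b hsi hb) rfl rfl]
    by_cases hbr : (↑s : Int) < ↑i ∧ PySem.List.pyGetD S (↑i - 1) "" = "#"
    · rw [if_pos hbr, if_pos hbr]
    · rw [if_neg hbr, if_neg hbr]
      have hcast : ((i : Int) + (k : Int)) = ((i + k : Nat) : Int) := by push_cast; ring
      have hgetik : PySem.List.pyGetD S ((i : Int) + (k : Int)) "" = S[i + k] := by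
        rw [hcast, PySem.List.pyGetD_natCast, List.getD_eq_getElem S "" hik]
      have hgeti : PySem.List.pyGetD S (i : Int) "" = S[i] := by
        rw [PySem.List.pyGetD_natCast, List.getD_eq_getElem S "" hi]
      have hne : ((i : Int) + (k : Int)) ≠ (S.length : Int) := by
        rw [hcast]; intro hcontra
        have : i + k = S.length := by exact_mod_cast hcontra
        omega
      have hyield : ((S[i + k] ≠ "#") ∧ ∀ x ∈ (S.drop i).take k, x ≠ ".")
          ↔ (((((S.drop i).take k).countP (fun x => x == ".")) : Int) = 0
             ∧ ((↑i + ↑k : Int) = ↑S.length ∨ PySem.List.pyGetD S ((↑i : Int) + ↑k) "" ≠ "#")) := by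
        rw [count_iff, hgetik]
        constructor
        · intro h0; exact ⟨h0.2, Or.inr h0.1⟩
        · intro h0; exact ⟨h0.2.resolve_left hne, h0.1⟩
      have hwin : (S.drop i).take k ++ [S[i + k]] = S.getD i "" :: (S.drop (i + 1)).take k :=
        window_shift S i k hik
      have hcnt : (((S.drop (i + 1)).take k).countP (fun x => x == ".") : Int)
          = (((S.drop i).take k).countP (fun x => x == ".") : Int)
            + (if S[i + k] = "." then 1 else 0) - (if S[i] = "." then 1 else 0) := by
        have hc := congrArg (List.countP (fun x => x == ".")) hwin
        rw [List.countP_append, List.countP_cons] at hc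
        have hgd : S.getD i "" = S[i] := List.getD_eq_getElem S "" hi
        rw [hgd] at hc
        simp only [List.countP_cons, List.countP_nil, beq_iff_eq] at hc
        by_cases h1 : S[i + k] = "." <;> by_cases h2 : S[i] = "." <;>
          simp only [h1, h2, if_pos, if_neg, not_false_iff] at hc ⊢ <;>
          omega
      rw [if_congr hyield rfl rfl, hwin]
      have hcasti : ((i : Int) + 1) = ((i + 1 : Nat) : Int) := by push_cast; ring
      rw [hcasti]
      have hdots : (if (↑i : Int) < ↑S.length - ↑k then
            (((S.drop i).take k).countP (fun x => x == ".") : Int)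
              + (if PySem.List.pyGetD S ((↑i : Int) + ↑k) "" = "." then 1 else 0)
              - (if PySem.List.pyGetD S (↑i : Int) "" = "." then 1 else 0)
          else (((S.drop i).take k).countP (fun x => x == ".") : Int))
          = (((S.drop (i + 1)).take k).countP (fun x => x == ".") : Int) := by
        rw [if_pos (by omega : (↑i : Int) < ↑S.length - ↑k), hgetik, hgeti, hcnt]
      rw [hdots]
      have hnext := ih (i + 1) (by omega) (by omega) (S.getD i "")
        (by rw [if_neg (by omega), Nat.add_sub_cancel]) 
      rw [show i + 1 + k = i + k + 1 from by omega] at hnext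
      exact hnext _

-- ===== VERDICT (by name: the statement is the Claim_ definition above) =====
theorem active_placements_spec : Claim_equal_active_placements := by
  intro states n_active _dom
  unfold Spec_active_placements active_placements active_placements_alt
  cases hfs : pvFindStart 0 states with
  | none => rfl
  | some start =>
    dsimp only
    obtain ⟨t, ht, -, hlt⟩ := pvFindStart_spec states 0 start (by simpa using hfs)
    subst ht
    have hlt' : t < states.length := by omega
    by_cases hneg : n_active < 0
    · rw [if_neg (by
        intro hcontr
        have := Int.natCast_nonneg (PySem.List.slice states (some ↑t) (some (↑t + n_active))).length
        omega), if_pos (Or.inl hneg)]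
    · rw [Int.not_lt] at hneg
      have hk : n_active = ((n_active.toNat : Nat) : Int) := (Int.toNat_of_nonneg hneg).symm
      rw [hk]
      rw [PySem.List.slice_natCast_add]
      have hlen_pfx : ((List.take n_active.toNat (List.drop t states)).length : Int)
          = ((min n_active.toNat (states.length - t) : Nat) : Int) := by
        simp [List.length_take, List.length_drop]
      by_cases hfit : t + n_active.toNat ≤ states.length
      · have hga : ((List.take n_active.toNat (List.drop t states)).length : Int)
            = ((n_active.toNat : Nat) : Int) := by
          rw [hlen_pfx]
          have : min n_active.toNat (states.length - t) = n_active.toNat := by omega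
          exact_mod_cast congrArg (Nat.cast : Nat → Int) this
        rw [if_pos hga]
        have hgb : ¬(((n_active.toNat : Nat) : Int) < 0
            ∨ (↑t : Int) + ↑n_active.toNat > ↑states.length) := by omega
        rw [if_neg hgb]
        rw [show ((t : Int) + (n_active.toNat : Int)) = ((t + n_active.toNat : Nat) : Int) from by push_cast; ring]
        rw [PySem.List.slice_from_natCast]
        have hfuel : ((states.length : Int) - ↑n_active.toNat + 1 - ↑t).toNat
            = (states.length - (t + n_active.toNat)) + 1 := by omega
        rw [hfuel]
        exact loop_eq states n_active.toNat t (states.length - (t + n_active.toNat)) t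
          le_rfl (by omega) "." (by rw [if_pos rfl]) []
      · have hga : ¬(((List.take n_active.toNat (List.drop t states)).length : Int)
            = ((n_active.toNat : Nat) : Int)) := by
          rw [hlen_pfx]
          intro hc
          have : min n_active.toNat (states.length - t) = n_active.toNat := by exact_mod_cast hc
          omega
        rw [if_neg hga]
        have hgb : (((n_active.toNat : Nat) : Int) < 0
            ∨ (↑t : Int) + ↑n_active.toNat > ↑states.length) := Or.inr (by omega)
        rw [if_pos hgb]
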